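-- pv_equiv track=rewrite | github.com/MrBrantCode/unitest_baseline | mut_generate/mist_train_cf/cf_16283/solution.py | get_sorted_odd_numbers
-- ===== SOURCE A (Python) =====
-- def get_sorted_odd_numbers(nums):
--     # Create a set to store unique odd numbers
--     odd_nums = set()
--
--     # Iterate through the input list and add odd numbers to the set
--     for num in nums:
--         if num % 2 != 0:
--             odd_nums.add(num)
--
--     # Convert the set back to a list
--     odd_nums = list(odd_nums)
--
--     # Sort the list in descending order using bubble sort algorithm
--     n = len(odd_nums)
--     for i in range(n):
--         for j in range(0, n-i-1):
--             if odd_nums[j] < odd_nums[j+1]: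
--                 odd_nums[j], odd_nums[j+1] = odd_nums[j+1], odd_nums[j]
--
--     return odd_nums
-- ===== SOURCE B (Python) =====
-- def get_sorted_odd_numbers(nums):
--     # Collect the odd numbers (duplicates kept), sort descending with the
--     # built-in sort, then deduplicate by a single adjacent-difference pass.
--     odds = [x for x in nums if x % 2 != 0]
--     ordered = sorted(odds, reverse=True)
--     result = []
--     for x in ordered:
--         if not result or result[-1] != x:
--             result.append(x)
--     return result
-- ===== Notes on version B (the rewrite author's own statement) =====
-- stated objective: faster
-- what changed: Replaces A's hash-set deduplication followed by an O(k^2) bubble sort with a filter, the built-in O(n log n) descending sort, and a single adjacent-scan pass that deduplicates the sorted list.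
import Mathlib
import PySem

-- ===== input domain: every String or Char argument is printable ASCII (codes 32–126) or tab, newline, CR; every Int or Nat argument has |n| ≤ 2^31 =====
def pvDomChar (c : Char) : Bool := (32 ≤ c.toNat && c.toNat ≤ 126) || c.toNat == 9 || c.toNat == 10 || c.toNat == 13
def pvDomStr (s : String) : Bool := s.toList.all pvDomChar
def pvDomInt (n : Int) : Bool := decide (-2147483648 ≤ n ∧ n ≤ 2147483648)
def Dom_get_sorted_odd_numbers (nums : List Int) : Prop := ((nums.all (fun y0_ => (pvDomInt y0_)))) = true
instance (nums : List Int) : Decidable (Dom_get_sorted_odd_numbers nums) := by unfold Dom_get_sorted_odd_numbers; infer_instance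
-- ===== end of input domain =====

-- B replaces A's hash-set dedup + quadratic bubble sort by filter, built-in descending sort,
-- and a single adjacent-scan dedup pass (objective: faster).

-- ===== PORT A =====
-- body of A's inner loop: compare odd[j] and odd[j+1], swap if ascending
-- (getD 0 is exact here: every index A reaches is in range, j+1 ≤ n-i-1 < n)
def pvStepA (l : List Int) (j : Nat) : List Int :=
  let a := l.getD j 0
  let b := l.getD (j+1) 0
  if a < b then (l.set j b).set (j+1) a else l

def get_sorted_odd_numbers (nums : List Int) : List Int :=
  let odd_nums : PySem.Set Int :=
    nums.foldl (fun s num => if PySem.Int.mod num 2 ≠ 0 then PySem.Set.add s num else s)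
      PySem.Set.empty
  let n := odd_nums.length
  (List.range n).foldl (fun l i => (List.range (n - i - 1)).foldl pvStepA l) odd_nums

-- ===== PORT B =====
def get_sorted_odd_numbers_alt (nums : List Int) : List Int :=
  let odds := nums.filter (fun x => decide (PySem.Int.mod x 2 ≠ 0))
  let ordered := PySem.List.sorted odds (fun x => x) true
  ordered.foldl
    (fun result x =>
      if result.isEmpty || (PySem.List.pyGet? result (-1) != some x) then result ++ [x]
      else result) []

-- ===== PRECONDITION & SPEC =====
def Spec_get_sorted_odd_numbers (nums : List Int) (out : List Int) : Prop := out = get_sorted_odd_numbers_alt nums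
instance (nums : List Int) (out : List Int) : Decidable (Spec_get_sorted_odd_numbers nums out) := by unfold Spec_get_sorted_odd_numbers; infer_instance

-- ===== CLAIM (what is proved, stated in full; the proofs are below) =====
def Claim_equal_get_sorted_odd_numbers : Prop := ∀ (nums : List Int), Dom_get_sorted_odd_numbers nums → Spec_get_sorted_odd_numbers nums (get_sorted_odd_numbers nums)

-- ===== LEMMAS AND PROOFS =====

-- ---- A side: bubble sort ----

-- one full bubble pass over a list, in functional form
def pvFpass : List Int → List Int
  | [] => []
  | [x] => [x]
  | x :: y :: t => if x < y then y :: pvFpass (x :: t) else x :: pvFpass (y :: t)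
termination_by l => l.length
decreasing_by all_goals (simp only [List.length_cons]; omega)

lemma pvFpass_perm (l : List Int) : (pvFpass l).Perm l := by
  induction l using pvFpass.induct with
  | case1 => simp [pvFpass]
  | case2 x => simp [pvFpass]
  | case3 x y t h ih =>
      simp only [pvFpass, if_pos h]
      exact (ih.cons y).trans (List.Perm.swap x y t)
  | case4 x y t h ih =>
      simp only [pvFpass, if_neg h]
      exact ih.cons x

-- the last element of a full pass is a minimum of the list
lemma pvFpass_concat (l : List Int) (hne : l ≠ []) :
    ∃ q m, pvFpass l = q ++ [m] ∧ ∀ x ∈ l, m ≤ x := by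
  induction l using pvFpass.induct with
  | case1 => exact absurd rfl hne
  | case2 x => exact ⟨[], x, by simp [pvFpass], by simp⟩
  | case3 x y t h ih =>
      obtain ⟨q, m, hq, hm⟩ := ih (by simp)
      refine ⟨y :: q, m, by simp [pvFpass, if_pos h, hq], ?_⟩
      intro z hz
      rcases List.mem_cons.1 hz with rfl | hz'
      · exact hm z (by simp)
      · rcases List.mem_cons.1 hz' with rfl | hz''
        · exact le_of_lt (lt_of_le_of_lt (hm x (by simp)) h)
        · exact hm z (by simp [hz''])
  | case4 x y t h ih =>
      obtain ⟨q, m, hq, hm⟩ := ih (by simp)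
      refine ⟨x :: q, m, by simp [pvFpass, if_neg h, hq], ?_⟩
      intro z hz
      rcases List.mem_cons.1 hz with rfl | hz'
      · exact le_trans (hm y (by simp)) (not_lt.1 h)
      · exact hm z hz'

lemma pvStepA_cons (z : Int) (t : List Int) (j : Nat) :
    pvStepA (z :: t) (j+1) = z :: pvStepA t j := by
  unfold pvStepA
  simp only [List.getD_cons_succ, List.set_cons_succ]
  split <;> rfl

lemma pvFoldl_stepA_cons (is : List Nat) (z : Int) (t : List Int) :
    is.foldl (fun l j => pvStepA l (j+1)) (z :: t) = z :: is.foldl pvStepA t := by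
  induction is generalizing t with
  | nil => rfl
  | cons j is ih => simp only [List.foldl_cons, pvStepA_cons, ih]

-- the inner index loop over range(m) on p ++ s, |p| = m+1, is a full pass over p
lemma pvInner_eq_fpass (m : Nat) (p s : List Int) (hp : p.length = m + 1) :
    (List.range m).foldl pvStepA (p ++ s) = pvFpass p ++ s := by
  induction m generalizing p s with
  | zero =>
      cases p with
      | nil => simp at hp
      | cons x p' =>
          have hp' : p' = [] := by simpa using hp
          subst hp'
          simp [pvFpass]
  | succ m ih =>
      cases p with
      | nil => simp at hp
      | cons x p' =>
        cases p' with
        | nil => simp at hp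
        | cons y t =>
          have hlen : (x :: t).length = m + 1 := by simpa using hp
          have hlen' : (y :: t).length = m + 1 := by simpa using hp
          have h0 : pvStepA ((x :: y :: t) ++ s) 0 =
              if x < y then (y :: x :: t) ++ s else (x :: y :: t) ++ s := by
            by_cases h : x < y <;> simp [pvStepA, h]
          rw [List.range_succ_eq_map, List.foldl_cons, List.foldl_map, h0]
          simp only [Nat.succ_eq_add_one]
          by_cases h : x < y
          · rw [if_pos h]
            show (List.range m).foldl (fun l j => pvStepA l (j+1)) (y :: ((x :: t) ++ s)) = _
            rw [pvFoldl_stepA_cons, ih (x :: t) s hlen]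
            simp [pvFpass, if_pos h]
          · rw [if_neg h]
            show (List.range m).foldl (fun l j => pvStepA l (j+1)) (x :: ((y :: t) ++ s)) = _
            rw [pvFoldl_stepA_cons, ih (y :: t) s hlen']
            simp [pvFpass, if_neg h]

-- invariant after each outer pass: the last (length - k) elements are settled
def pvInv (k : Nat) (l : List Int) : Prop :=
  (∀ x ∈ l.take k, ∀ y ∈ l.drop k, y ≤ x) ∧ (l.drop k).Pairwise (fun a b => b ≤ a)

lemma pvOuter_step (n j : Nat) (l : List Int) (hlen : l.length = n) (hj : j < n)
    (hinv : pvInv (n - j) l) :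
    ((List.range (n - j - 1)).foldl pvStepA l).Perm l ∧
      pvInv (n - j - 1) ((List.range (n - j - 1)).foldl pvStepA l) := by
  set m := n - j - 1 with hm
  have hmn : m + 1 = n - j := by omega
  have hinv' : pvInv (m + 1) l := by rw [hmn]; exact hinv
  have hp : (l.take (m+1)).length = m + 1 := by
    rw [List.length_take]; omega
  have hsplit : l = l.take (m+1) ++ l.drop (m+1) := (List.take_append_drop _ _).symm
  have hfold : (List.range m).foldl pvStepA l = pvFpass (l.take (m+1)) ++ l.drop (m+1) := by
    conv_lhs => rw [hsplit]
    exact pvInner_eq_fpass m _ _ hp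
  obtain ⟨q, mn, hq, hmn_le⟩ := pvFpass_concat (l.take (m+1)) (by
    intro h; rw [h] at hp; simp at hp)
  have hperm_p : (pvFpass (l.take (m+1))).Perm (l.take (m+1)) := pvFpass_perm _
  have hmem_p : ∀ x ∈ pvFpass (l.take (m+1)), x ∈ l.take (m+1) :=
    fun x hx => hperm_p.mem_iff.1 hx
  have hmn_mem : mn ∈ l.take (m+1) := hmem_p mn (by rw [hq]; simp)
  have hql : q.length = m := by
    have h1 := hperm_p.length_eq
    rw [hq, hp] at h1; simp at h1; omega
  have hres : (List.range m).foldl pvStepA l = q ++ (mn :: l.drop (m+1)) := by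
    rw [hfold, hq]; simp
  constructor
  · rw [hfold]
    have h2 : (pvFpass (l.take (m+1)) ++ l.drop (m+1)).Perm (l.take (m+1) ++ l.drop (m+1)) :=
      hperm_p.append_right _
    rwa [List.take_append_drop] at h2
  · rw [hres]
    have htk : (q ++ (mn :: l.drop (m+1))).take m = q := List.take_left' hql
    have hdr : (q ++ (mn :: l.drop (m+1))).drop m = mn :: l.drop (m+1) := List.drop_left' hql
    constructor
    · rw [htk, hdr]
      intro x hx y hy
      have hx' : x ∈ l.take (m+1) := hmem_p x (by rw [hq]; exact List.mem_append_left _ hx)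
      rcases List.mem_cons.1 hy with rfl | hy'
      · exact hmn_le x hx'
      · exact hinv'.1 x hx' y hy'
    · rw [hdr]
      exact List.Pairwise.cons (fun y hy => hinv'.1 mn hmn_mem y hy) hinv'.2

-- the outer loop establishes the invariant for every prefix of passes
lemma pvOuter_inv (l0 : List Int) (j : Nat) (hj : j ≤ l0.length) :
    ((List.range j).foldl
        (fun l i => (List.range (l0.length - i - 1)).foldl pvStepA l) l0).Perm l0 ∧
      pvInv (l0.length - j)
        ((List.range j).foldl
          (fun l i => (List.range (l0.length - i - 1)).foldl pvStepA l) l0) := by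
  induction j with
  | zero =>
      simp only [List.range_zero, List.foldl_nil, Nat.sub_zero]
      refine ⟨List.Perm.refl _, ?_, ?_⟩
      · intro x _ y hy
        rw [List.drop_length] at hy
        exact absurd hy (List.not_mem_nil)
      · rw [List.drop_length]
        exact List.Pairwise.nil
  | succ j ih =>
      obtain ⟨hperm, hinv⟩ := ih (by omega)
      rw [List.range_succ, List.foldl_append, List.foldl_cons, List.foldl_nil]
      set lj := (List.range j).foldl
        (fun l i => (List.range (l0.length - i - 1)).foldl pvStepA l) l0 with hlj
      have hstep := pvOuter_step l0.length j lj (hperm.length_eq.trans rfl) (by omega) hinv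
      exact ⟨hstep.1.trans hperm, by
        have h3 : l0.length - (j+1) = l0.length - j - 1 := by omega
        rw [h3]; exact hstep.2⟩

-- the bubble sort block of A: a descending rearrangement of its input
lemma pvBubble_spec (l0 : List Int) :
    ((List.range l0.length).foldl
        (fun l i => (List.range (l0.length - i - 1)).foldl pvStepA l) l0).Perm l0 ∧
      ((List.range l0.length).foldl
        (fun l i => (List.range (l0.length - i - 1)).foldl pvStepA l) l0).Pairwise
        (fun a b => b ≤ a) := by
  obtain ⟨hperm, hinv⟩ := pvOuter_inv l0 l0.length (le_refl _)
  exact ⟨hperm, by simpa using hinv.2⟩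

-- descending + no duplicates = strictly descending
lemma pvStrict_of_nodup {l : List Int} (h1 : l.Pairwise (fun a b => b ≤ a)) (h2 : l.Nodup) :
    l.Pairwise (fun a b => b < a) :=
  (h1.and h2).imp (fun hab => lt_of_le_of_ne hab.1 (Ne.symm hab.2))

-- ---- B side: adjacent-scan dedup ----

def pvCollapseAux (prev : Int) : List Int → List Int
  | [] => []
  | x :: t => if x = prev then pvCollapseAux prev t else x :: pvCollapseAux x t

def pvCollapse : List Int → List Int
  | [] => []
  | x :: t => x :: pvCollapseAux x t

-- B's dedup loop computes pvCollapseAux past a nonempty accumulator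
lemma pvFold_dedup_eq (l : List Int) : ∀ (q : List Int) (p : Int),
    l.foldl
      (fun result x =>
        if result.isEmpty || (PySem.List.pyGet? result (-1) != some x) then result ++ [x]
        else result) (q ++ [p]) = (q ++ [p]) ++ pvCollapseAux p l := by
  induction l with
  | nil => intro q p; simp [pvCollapseAux]
  | cons x t ih =>
      intro q p
      rw [List.foldl_cons]
      by_cases hx : x = p
      · subst hx
        rw [if_neg (by simp)]
        rw [ih q x]
        simp [pvCollapseAux]
      · rw [if_pos (by simp; exact fun h => hx h.symm)]
        rw [ih (q ++ [p]) x]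
        simp [pvCollapseAux, hx]

lemma pvFold_dedup (l : List Int) :
    l.foldl
      (fun result x =>
        if result.isEmpty || (PySem.List.pyGet? result (-1) != some x) then result ++ [x]
        else result) [] = pvCollapse l := by
  cases l with
  | nil => rfl
  | cons x t =>
      rw [List.foldl_cons]
      have h0 : (if ([] : List Int).isEmpty || (PySem.List.pyGet? ([] : List Int) (-1) != some x)
          then ([] : List Int) ++ [x] else []) = [x] := by simp
      rw [h0]
      have := pvFold_dedup_eq t [] x
      simpa [pvCollapse] using this

lemma pvCollapseAux_mem (p : Int) (l : List Int) (a : Int) :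
    a ∈ pvCollapseAux p l → a ∈ l := by
  induction l generalizing p with
  | nil => intro h; exact absurd h (List.not_mem_nil)
  | cons x t ih =>
      intro h
      rw [pvCollapseAux] at h
      by_cases hx : x = p
      · rw [if_pos hx] at h; exact List.mem_cons_of_mem _ (ih p h)
      · rw [if_neg hx] at h
        rcases List.mem_cons.1 h with rfl | h'
        · exact List.mem_cons_self
        · exact List.mem_cons_of_mem _ (ih x h')

lemma pvCollapseAux_mem_rev (p : Int) (l : List Int) (a : Int) :
    a ∈ l → a = p ∨ a ∈ pvCollapseAux p l := by
  induction l generalizing p with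
  | nil => intro h; exact absurd h (List.not_mem_nil)
  | cons x t ih =>
      intro h
      rw [pvCollapseAux]
      by_cases hx : x = p
      · rw [if_pos hx]
        rcases List.mem_cons.1 h with rfl | h'
        · exact Or.inl hx
        · exact ih p h'
      · rw [if_neg hx]
        rcases List.mem_cons.1 h with rfl | h'
        · exact Or.inr List.mem_cons_self
        · rcases ih x h' with rfl | h''
          · exact Or.inr List.mem_cons_self
          · exact Or.inr (List.mem_cons_of_mem _ h'')

lemma pvCollapse_mem (l : List Int) (a : Int) : a ∈ pvCollapse l ↔ a ∈ l := by
  cases l with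
  | nil => rfl
  | cons x t =>
      rw [pvCollapse]
      constructor
      · intro h
        rcases List.mem_cons.1 h with rfl | h'
        · exact List.mem_cons_self
        · exact List.mem_cons_of_mem _ (pvCollapseAux_mem x t a h')
      · intro h
        rcases List.mem_cons.1 h with rfl | h'
        · exact List.mem_cons_self
        · rcases pvCollapseAux_mem_rev x t a h' with rfl | h''
          · exact List.mem_cons_self
          · exact List.mem_cons_of_mem _ h''

lemma pvCollapseAux_strict (l : List Int) : ∀ (p : Int),
    l.Pairwise (fun a b => b ≤ a) → (∀ x ∈ l, x ≤ p) →
    (pvCollapseAux p l).Pairwise (fun a b => b < a) ∧ ∀ y ∈ pvCollapseAux p l, y < p := by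
  induction l with
  | nil => intro p _ _; exact ⟨List.Pairwise.nil, fun y hy => absurd hy (List.not_mem_nil)⟩
  | cons x t ih =>
      intro p hpw hle
      have hxp : x ≤ p := hle x List.mem_cons_self
      have ht : t.Pairwise (fun a b => b ≤ a) := (List.pairwise_cons.1 hpw).2
      have htx : ∀ y ∈ t, y ≤ x := (List.pairwise_cons.1 hpw).1
      rw [pvCollapseAux]
      by_cases hx : x = p
      · rw [if_pos hx]
        exact ih p ht (fun y hy => le_trans (htx y hy) hxp)
      · rw [if_neg hx]
        have hxlt : x < p := lt_of_le_of_ne hxp hx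
        obtain ⟨h1, h2⟩ := ih x ht htx
        refine ⟨List.Pairwise.cons (fun y hy => h2 y hy) h1, ?_⟩
        intro y hy
        rcases List.mem_cons.1 hy with rfl | hy'
        · exact hxlt
        · exact lt_trans (h2 y hy') hxlt

lemma pvCollapse_strict (l : List Int) (h : l.Pairwise (fun a b => b ≤ a)) :
    (pvCollapse l).Pairwise (fun a b => b < a) := by
  cases l with
  | nil => exact List.Pairwise.nil
  | cons x t =>
      rw [pvCollapse]
      obtain ⟨h1, h2⟩ := pvCollapseAux_strict t x (List.pairwise_cons.1 h).2
        (List.pairwise_cons.1 h).1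
      exact List.Pairwise.cons (fun y hy => h2 y hy) h1

-- ---- assembly ----

lemma pvA_eq_sorted (nums : List Int) :
    get_sorted_odd_numbers nums =
      PySem.List.sorted
        (PySem.Set.ofList (nums.filter (fun x => decide (PySem.Int.mod x 2 ≠ 0))))
        (fun x => x) true := by
  have hset : nums.foldl
      (fun s num => if PySem.Int.mod num 2 ≠ 0 then PySem.Set.add s num else s)
      PySem.Set.empty =
      PySem.Set.ofList (nums.filter (fun x => decide (PySem.Int.mod x 2 ≠ 0))) := by
    rw [PySem.List.foldl_ite_eq_foldl_filter (p := fun x => PySem.Int.mod x 2 ≠ 0)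
      (f := PySem.Set.add)]
    rw [PySem.Set.ofList_eq_foldl]
    rfl
  have h1 : get_sorted_odd_numbers nums =
      (List.range ((nums.foldl
          (fun s num => if PySem.Int.mod num 2 ≠ 0 then PySem.Set.add s num else s)
          PySem.Set.empty).length)).foldl
        (fun l i => (List.range ((nums.foldl
            (fun s num => if PySem.Int.mod num 2 ≠ 0 then PySem.Set.add s num else s)
            PySem.Set.empty).length - i - 1)).foldl pvStepA l)
        (nums.foldl
          (fun s num => if PySem.Int.mod num 2 ≠ 0 then PySem.Set.add s num else s)
          PySem.Set.empty) := rfl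
  rw [h1, hset]
  set s0 := PySem.Set.ofList (nums.filter (fun x => decide (PySem.Int.mod x 2 ≠ 0))) with hs0
  obtain ⟨hperm, hpw⟩ := pvBubble_spec s0
  have hnd : ((List.range s0.length).foldl
      (fun l i => (List.range (s0.length - i - 1)).foldl pvStepA l) s0).Nodup :=
    hperm.nodup_iff.2 (PySem.Set.nodup_ofList _)
  exact (PySem.List.sorted_rev_eq_of_perm_of_pairwise_gt _ _ _ hperm
    (pvStrict_of_nodup hpw hnd)).symm

lemma pvB_eq_sorted (nums : List Int) :
    get_sorted_odd_numbers_alt nums =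
      PySem.List.sorted
        (PySem.Set.ofList (nums.filter (fun x => decide (PySem.Int.mod x 2 ≠ 0))))
        (fun x => x) true := by
  have h1 : get_sorted_odd_numbers_alt nums =
      (PySem.List.sorted (nums.filter (fun x => decide (PySem.Int.mod x 2 ≠ 0)))
          (fun x => x) true).foldl
        (fun result x =>
          if result.isEmpty || (PySem.List.pyGet? result (-1) != some x) then result ++ [x]
          else result) [] := rfl
  rw [h1, pvFold_dedup]
  set odds := nums.filter (fun x => decide (PySem.Int.mod x 2 ≠ 0)) with hodds
  set ordered := PySem.List.sorted odds (fun x => x) true with hordered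
  have hpw : ordered.Pairwise (fun a b => b ≤ a) := PySem.List.sorted_pairwise_rev odds _
  have hstrict : (pvCollapse ordered).Pairwise (fun a b => b < a) := pvCollapse_strict _ hpw
  have hnd : (pvCollapse ordered).Nodup := hstrict.imp (fun h => ne_of_gt h)
  have hmem : ∀ a, a ∈ pvCollapse ordered ↔ a ∈ PySem.Set.ofList odds := by
    intro a
    rw [pvCollapse_mem, hordered, PySem.List.mem_sorted, PySem.Set.mem_ofList]
  have hperm : (pvCollapse ordered).Perm (PySem.Set.ofList odds) :=
    (List.perm_ext_iff_of_nodup hnd (PySem.Set.nodup_ofList _)).2 hmem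
  exact (PySem.List.sorted_rev_eq_of_perm_of_pairwise_gt _ _ _ hperm hstrict).symm

-- ===== VERDICT (by name: the statement is the Claim_ definition above) =====
theorem get_sorted_odd_numbers_spec : Claim_equal_get_sorted_odd_numbers := by
  intro nums _
  unfold Spec_get_sorted_odd_numbers
  rw [pvA_eq_sorted, pvB_eq_sorted]
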